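-- pv_equiv track=rewrite | github.com/matthieucabos/Raptor-Cryptographic-Algorithm | basetestrecursivev4.2_longchaine.py | slurp4
-- ===== SOURCE A (Python) =====
-- def slurp4(chaine):
-- 	"""
-- 		This method is similar of the slurp2 method. It defined a third level of crypting management.
--
-- 		=============== ========== ==================================
-- 		**Parameters**   **Type**   **Description**
-- 		*chaine*         str         The raw string crypted message
-- 		=============== ========== ==================================
--
-- 		Returns
-- 		=======
-- 		str list res : The list of crypted terms rebuilded from the raw string.
-- 	"""
-- 	tmp=''
-- 	res = []
-- 	sep=['A','B','C','D','E','F','G','H','I','J','K','L']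
-- 	for elem in chaine:
-- 		if(not elem in sep):
-- 			tmp+=str(elem)
-- 		else:
-- 			res.append(tmp)
-- 			tmp=''
-- 		if(elem==''):
-- 			break
-- 	res.append(tmp)
-- 	return res
-- ===== SOURCE B (Python) =====
-- import re
--
-- def slurp4(chaine):
--     # One regex split on the separator characters A-L; same empty-token
--     # behaviour as the manual accumulator loop (consecutive/leading/trailing
--     # separators and the empty string all yield empty tokens).
--     return re.split(r'[A-L]', chaine)
-- ===== Notes on version B (the rewrite author's own statement) =====
-- stated objective: idiomatic
-- what changed: The manual character loop with a tmp buffer, append-on-separator and final trailing append is replaced by a single re.split on the character class [A-L].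
import Mathlib
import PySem

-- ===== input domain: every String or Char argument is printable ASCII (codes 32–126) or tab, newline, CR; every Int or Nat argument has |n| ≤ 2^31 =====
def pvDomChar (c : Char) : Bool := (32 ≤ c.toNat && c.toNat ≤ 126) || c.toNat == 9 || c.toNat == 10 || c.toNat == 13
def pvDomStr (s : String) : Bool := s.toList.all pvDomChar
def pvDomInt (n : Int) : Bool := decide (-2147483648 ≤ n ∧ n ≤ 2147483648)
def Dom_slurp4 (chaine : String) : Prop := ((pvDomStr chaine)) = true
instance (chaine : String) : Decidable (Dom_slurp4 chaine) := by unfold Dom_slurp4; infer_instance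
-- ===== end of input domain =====

-- B replaces A's manual tmp-buffer accumulator loop with a single regex split
-- on the character class [A-L] (objective: idiomatic); same return value.

-- ===== PORT A =====
-- A's separator list sep = ['A',...,'L']
def slurp4_sep : List Char := ['A','B','C','D','E','F','G','H','I','J','K','L']

-- state: (res, tmp); the Python `if elem == '': break` is unreachable (a
-- character of a string is never the empty string), so the loop never breaks.
def slurp4_step (st : List (List Char) × List Char) (elem : Char) :
    List (List Char) × List Char :=
  if ¬ (elem ∈ slurp4_sep) then (st.1, st.2 ++ [elem]) else (st.1 ++ [st.2], [])

def slurp4 (chaine : String) : List String :=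
  let st := chaine.toList.foldl slurp4_step ([], [])
  (st.1 ++ [st.2]).map String.mk   -- res.append(tmp); return res

-- ===== PORT B =====
-- re.split(r'[A-L]', chaine): split on every char in the range A..L,
-- keeping empty tokens — exactly List.splitOnP on that character class.
def slurp4_alt (chaine : String) : List String :=
  (List.splitOnP (fun c => decide ('A' ≤ c ∧ c ≤ 'L')) chaine.toList).map String.mk

-- ===== PRECONDITION & SPEC =====
def Spec_slurp4 (chaine : String) (out : List String) : Prop := out = slurp4_alt chaine
instance (chaine : String) (out : List String) : Decidable (Spec_slurp4 chaine out) := by unfold Spec_slurp4; infer_instance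

-- ===== CLAIM (what is proved, stated in full; the proofs are below) =====
def Claim_equal_slurp4 : Prop := ∀ (chaine : String), Dom_slurp4 chaine → Spec_slurp4 chaine (slurp4 chaine)

-- ===== LEMMAS AND PROOFS =====

-- membership in A's separator list is the range test B uses
theorem slurp4_sep_mem (c : Char) :
    (c ∈ slurp4_sep) = ('A' ≤ c ∧ c ≤ 'L') := by
  have h1 : ∀ d : Char, (c ≤ d) = (c.val ≤ d.val) := fun d => rfl
  have h2 : ∀ d : Char, (d ≤ c) = (d.val ≤ c.val) := fun d => rfl
  simp only [slurp4_sep, List.mem_cons, List.not_mem_nil, or_false, eq_iff_iff, h1, h2,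
    Char.ext_iff, UInt32.le_iff_toNat_le, UInt32.ext_iff,
    show ('A':Char).val.toNat = 65 from rfl, show ('B':Char).val.toNat = 66 from rfl,
    show ('C':Char).val.toNat = 67 from rfl, show ('D':Char).val.toNat = 68 from rfl,
    show ('E':Char).val.toNat = 69 from rfl, show ('F':Char).val.toNat = 70 from rfl,
    show ('G':Char).val.toNat = 71 from rfl, show ('H':Char).val.toNat = 72 from rfl,
    show ('I':Char).val.toNat = 73 from rfl, show ('J':Char).val.toNat = 74 from rfl,
    show ('K':Char).val.toNat = 75 from rfl, show ('L':Char).val.toNat = 76 from rfl]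
  omega

-- loop invariant: A's fold with accumulator (res, tmp) produces
-- res ++ splitOnP with tmp prepended onto the first segment
theorem slurp4_loop (p : Char → Bool) (hp : ∀ c, (c ∈ slurp4_sep) = (p c = true))
    (l : List Char) (res : List (List Char)) (tmp : List Char) :
    (l.foldl slurp4_step (res, tmp)).1 ++ [(l.foldl slurp4_step (res, tmp)).2] =
      res ++ (List.splitOnP p l).modifyHead (tmp ++ ·) := by
  induction l generalizing res tmp with
  | nil => simp [List.splitOnP_nil]
  | cons a l ih =>
    rw [List.splitOnP_cons]
    by_cases h : p a
    · have hm : a ∈ slurp4_sep := by rw [hp]; exact h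
      simp only [List.foldl_cons, slurp4_step, hm, not_true_eq_false, if_false]
      rw [ih, if_pos h, List.modifyHead_cons, List.append_assoc]
      simp [List.modifyHead_id, show ((fun x : List Char => x)) = id from rfl]
    · have hm : ¬ a ∈ slurp4_sep := by rw [hp]; simpa using h
      simp only [List.foldl_cons, slurp4_step, hm, not_false_eq_true, if_true]
      rw [ih, if_neg (by simpa using h), List.modifyHead_modifyHead]
      congr 2
      funext x
      simp

-- ===== VERDICT (by name: the statement is the Claim_ definition above) =====
theorem slurp4_spec : Claim_equal_slurp4 := by
  intro chaine _
  unfold Spec_slurp4 slurp4 slurp4_alt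
  rw [show (let st := chaine.toList.foldl slurp4_step ([], []);
        (st.1 ++ [st.2]).map String.mk) =
      ((chaine.toList.foldl slurp4_step ([], [])).1 ++
        [(chaine.toList.foldl slurp4_step ([], [])).2]).map String.mk from rfl,
    slurp4_loop (fun c => decide ('A' ≤ c ∧ c ≤ 'L'))
      (fun c => by rw [slurp4_sep_mem]; simp) chaine.toList [] []]
  simp [List.modifyHead_id, show ((fun x : List Char => x)) = id from rfl]
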